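-- pv_equiv track=rewrite | github.com/suyalji/tutort_assignments | ARRAYS/Assignment_2/coins.py | minReplacement
-- ===== SOURCE A (Python) =====
-- def minReplacement(s):
--     length = len(s)
--     ans = 0
--     for i in range(0, length):
--
--         # If there is 1 at even index positions
--         if i % 2 == 0 and s[i] == '1':
--             ans += 1
--
--         # If there is 0 at odd index positions
--         if i % 2 == 1 and s[i] == '0':
--             ans += 1
--
--     return min(ans, length - ans)
-- ===== SOURCE B (Python) =====
-- def minReplacement(s):
--     # Divide and conquer: count(seg, par) is the number of positions in seg that
--     # already match the target alternating pattern "1010..." shifted by parity par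
--     # (par = parity of seg's first index in the whole string).  Split in half,
--     # solve both halves, add.
--     def count(seg, par):
--         n = len(seg)
--         if n == 0:
--             return 0
--         if n == 1:
--             return 1 if seg == ('1' if par == 0 else '0') else 0
--         m = n // 2
--         return count(seg[:m], par) + count(seg[m:], (par + m) % 2)
--     ans = count(s, 0)
--     return min(ans, len(s) - ans)
-- ===== Notes on version B (the rewrite author's own statement) =====
-- stated objective: alternative
-- what changed: Replaces A's single indexed loop with parity tests by a divide-and-conquer recursion that splits the string in half, counts matching positions in each half (threading the parity of the half's starting index), and adds the two counts.
import Mathlib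
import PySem

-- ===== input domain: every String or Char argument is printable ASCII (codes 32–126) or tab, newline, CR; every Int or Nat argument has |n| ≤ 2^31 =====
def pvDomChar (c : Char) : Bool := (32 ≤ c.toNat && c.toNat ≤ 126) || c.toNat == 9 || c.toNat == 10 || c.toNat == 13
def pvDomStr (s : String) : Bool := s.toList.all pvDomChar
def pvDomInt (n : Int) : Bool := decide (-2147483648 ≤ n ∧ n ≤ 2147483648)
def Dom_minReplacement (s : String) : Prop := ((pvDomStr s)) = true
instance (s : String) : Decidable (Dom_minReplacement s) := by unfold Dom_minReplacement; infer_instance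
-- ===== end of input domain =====

-- B replaces A's single indexed loop with parity tests by a divide-and-conquer recursion
-- (split the string in half, count matching positions in each half, add); same return value on all inputs.

-- ===== PORT A =====
def minReplacement (s : String) : Int :=
  let length : Int := PySem.Str.len s
  let ans : Int := (PySem.List.pyRange 0 length 1).foldl (fun ans i =>
    -- s[i] with i drawn from range(0, len(s)) is always in range, so pyGetD is exact here
    let ans := if PySem.Int.mod i 2 == 0 && PySem.List.pyGetD s.toList i ' ' == '1' then ans + 1 else ans
    if PySem.Int.mod i 2 == 1 && PySem.List.pyGetD s.toList i ' ' == '0' then ans + 1 else ans) 0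
  min ans (length - ans)

-- ===== PORT B =====
-- B's inner 'count(seg, par)': seg[:m] / seg[m:] with 0 ≤ m ≤ len(seg) are exactly take/drop;
-- the length-1 branch compares the whole one-char string, hence l = [...]
def minReplacementCount (l : List Char) (par : Nat) : Int :=
  if h0 : l.length = 0 then 0
  else if h1 : l.length = 1 then
    (if l = [if par = 0 then '1' else '0'] then 1 else 0)
  else
    minReplacementCount (l.take (l.length / 2)) par +
    minReplacementCount (l.drop (l.length / 2)) ((par + l.length / 2) % 2)
termination_by l.length
decreasing_by
  · simp only [List.length_take]; omega
  · simp only [List.length_drop]; omega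

def minReplacement_alt (s : String) : Int :=
  let ans := minReplacementCount s.toList 0
  min ans (PySem.Str.len s - ans)

-- ===== PRECONDITION & SPEC =====
def Spec_minReplacement (s : String) (out : Int) : Prop := out = minReplacement_alt s
instance (s : String) (out : Int) : Decidable (Spec_minReplacement s out) := by unfold Spec_minReplacement; infer_instance

-- ===== CLAIM (what is proved, stated in full; the proofs are below) =====
def Claim_equal_minReplacement : Prop := ∀ (s : String), Dom_minReplacement s → Spec_minReplacement s (minReplacement s)

-- ===== LEMMAS AND PROOFS =====

-- the per-index Bool test, parametrised by the parity offset par of the segment's first index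
def pvTestP (par : Nat) (l : List Char) (k : Nat) : Bool :=
  ((k + par) % 2 == 0 && (l.getD k ' ' == '1')) || ((k + par) % 2 == 1 && (l.getD k ' ' == '0'))

lemma count_eq_countP (l : List Char) (par : Nat) (hpar : par < 2) :
    minReplacementCount l par = ((List.range l.length).countP (pvTestP par l) : Int) := by
  induction l, par using minReplacementCount.induct with
  | case1 l par h0 =>
    rw [minReplacementCount]
    simp [h0]
  | case2 par h0 h1 =>
    rw [minReplacementCount]
    interval_cases par <;>
      simp [pvTestP, List.range_succ]
  | case3 l par h0 h1 hne =>
    rw [minReplacementCount]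
    obtain ⟨c, hc⟩ : ∃ c, l = [c] := by
      cases l with
      | nil => simp at h1
      | cons a t => cases t with
        | nil => exact ⟨a, rfl⟩
        | cons b u => simp at h1
    subst hc
    interval_cases par <;>
      simp_all [pvTestP, List.range_succ]
  | case4 l par h0 h1 ih1 ih2 =>
    rw [minReplacementCount]
    simp only [h0, h1, dif_neg, dite_false]
    rw [ih1 hpar, ih2 (Nat.mod_lt _ (by omega))]
    have hm : l.length / 2 ≤ l.length := Nat.div_le_self _ _
    have hsplit : l.length = l.length / 2 + (l.length - l.length / 2) := by omega
    have htake : (l.take (l.length / 2)).length = l.length / 2 := by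
      simp [List.length_take]; omega
    have hdrop : (l.drop (l.length / 2)).length = l.length - l.length / 2 := by
      simp [List.length_drop]
    rw [htake, hdrop]
    conv_rhs => rw [hsplit, List.range_add, List.countP_append, List.countP_map]
    have c1 : (List.range (l.length / 2)).countP (pvTestP par l)
        = (List.range (l.length / 2)).countP (pvTestP par (l.take (l.length / 2))) := by
      apply List.countP_congr
      intro k hk
      rw [List.mem_range] at hk
      simp only [pvTestP]
      have : (l.take (l.length / 2)).getD k ' ' = l.getD k ' ' := by
        simp only [List.getD, List.getElem?_take]
        simp [hk]
      rw [this]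
    have c2 : (List.range (l.length - l.length / 2)).countP (pvTestP par l ∘ (l.length / 2 + ·))
        = (List.range (l.length - l.length / 2)).countP
            (pvTestP ((par + l.length / 2) % 2) (l.drop (l.length / 2))) := by
      apply List.countP_congr
      intro k hk
      rw [List.mem_range] at hk
      simp only [Function.comp_apply, pvTestP]
      have hg : (l.drop (l.length / 2)).getD k ' ' = l.getD (l.length / 2 + k) ' ' := by
        simp [List.getD, List.getElem?_drop]
      have hp : (l.length / 2 + k + par) % 2 = (k + (par + l.length / 2) % 2) % 2 := by omega
      rw [hg, hp]
    rw [c1, c2]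
    push_cast
    ring

-- A's loop over range(0, len) as a countP over Nat indices (pvTestP 0)
lemma foldl_nat (l : List Char) (ks : List Nat) (a : Int) :
    ks.foldl (fun (ans : Int) (k : Nat) =>
      if PySem.Int.mod (↑k) 2 == 1 && PySem.List.pyGetD l (↑k) ' ' == '0' then
        (if PySem.Int.mod (↑k) 2 == 0 && PySem.List.pyGetD l (↑k) ' ' == '1' then ans + 1 else ans) + 1
      else if PySem.Int.mod (↑k) 2 == 0 && PySem.List.pyGetD l (↑k) ' ' == '1' then ans + 1 else ans) a
    = a + ((ks.countP (pvTestP 0 l)) : Int) := by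
  induction ks generalizing a with
  | nil => simp
  | cons k ks ih =>
    rw [List.foldl_cons, ih, List.countP_cons]
    rcases Nat.mod_two_eq_zero_or_one k with h | h
    · have hm2 : ((k:Int)) % 2 = 0 := by omega
      by_cases hc1 : l.getD k ' ' = '1' <;> by_cases hc0 : l.getD k ' ' = '0' <;>
        simp_all [pvTestP] <;> push_cast <;> ring
    · have hm2 : ((k:Int)) % 2 = 1 := by omega
      by_cases hc1 : l.getD k ' ' = '1' <;> by_cases hc0 : l.getD k ' ' = '0' <;>
        simp_all [pvTestP] <;> push_cast <;> ring

lemma ansA_eq (l : List Char) :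
    (PySem.List.pyRange 0 (l.length : Int) 1).foldl (fun ans i =>
      if PySem.Int.mod i 2 == 1 && PySem.List.pyGetD l i ' ' == '0' then
        (if PySem.Int.mod i 2 == 0 && PySem.List.pyGetD l i ' ' == '1' then ans + 1 else ans) + 1
      else if PySem.Int.mod i 2 == 0 && PySem.List.pyGetD l i ' ' == '1' then ans + 1 else ans) 0
    = ((List.range l.length).countP (pvTestP 0 l) : Int) := by
  rw [PySem.List.pyRange_one]
  simp only [sub_zero, Int.toNat_natCast, zero_add, List.foldl_map]
  exact (foldl_nat l (List.range l.length) 0).trans (zero_add _)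

-- ===== VERDICT (by name: the statement is the Claim_ definition above) =====
theorem minReplacement_spec : Claim_equal_minReplacement := by
  intro s _
  show minReplacement s = minReplacement_alt s
  unfold minReplacement minReplacement_alt
  simp only [PySem.Str.len_eq]
  rw [ansA_eq s.toList, count_eq_countP s.toList 0 (by omega)]
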